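-- pv_equiv track=rewrite | github.com/Angelvalkov2003/openai_pricing_scraped | openai_models/OpenAIScraper_3.py | _model_name_from_row
-- ===== SOURCE A (Python) =====
-- from typing import Dict, List, Optional, Any, Tuple
--
-- def _model_name_from_row(row: Dict[str, str]) -> Optional[str]:
--     for key, val in row.items():
--         if key.strip().lower() == 'model':
--             return val.strip() if isinstance(val, str) else val
--     for key, val in row.items():
--         if 'model' in key.lower():
--             return val.strip() if isinstance(val, str) else val
--     if row:
--         first = next(iter(row.values()))
--         return first.strip() if isinstance(first, str) else first
--     return None
-- ===== SOURCE B (Python) =====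
-- from typing import Dict, Optional
--
-- def _model_name_from_row(row: Dict[str, str]) -> Optional[str]:
--     sub_cand = None
--     first_cand = None
--     for key, val in row.items():
--         v = val.strip() if isinstance(val, str) else val
--         if key.strip().lower() == 'model':
--             return v
--         if sub_cand is None and 'model' in key.lower():
--             sub_cand = v
--         if first_cand is None:
--             first_cand = v
--     return sub_cand if sub_cand is not None else first_cand
-- ===== Notes on version B (the rewrite author's own statement) =====
-- stated objective: simpler
-- what changed: Replaces A's two full scans plus a separate non-empty fallback with one pass that returns on exact 'model' key match and otherwise records the first substring-match and first value as candidates.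
import Mathlib
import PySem

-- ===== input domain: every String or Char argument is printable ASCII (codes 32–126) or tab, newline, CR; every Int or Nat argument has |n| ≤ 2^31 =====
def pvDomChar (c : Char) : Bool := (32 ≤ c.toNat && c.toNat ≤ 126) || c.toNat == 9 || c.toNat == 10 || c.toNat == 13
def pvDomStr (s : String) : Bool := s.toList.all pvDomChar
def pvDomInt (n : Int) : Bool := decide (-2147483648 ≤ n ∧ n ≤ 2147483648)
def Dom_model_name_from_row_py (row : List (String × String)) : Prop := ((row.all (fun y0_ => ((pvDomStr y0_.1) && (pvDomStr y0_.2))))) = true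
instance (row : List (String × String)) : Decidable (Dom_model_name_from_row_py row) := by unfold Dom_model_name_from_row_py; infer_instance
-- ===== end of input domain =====

-- B replaces A's two full scans plus a non-empty fallback with one pass that returns
-- immediately on an exact 'model' key and otherwise records first-seen candidates (simpler).

-- ===== PORT A =====
-- first loop: return on exact (stripped, lowered) key match
-- second loop: return on substring match; then fallback to first value; else None
def model_name_from_row_py (row : List (String × String)) : Option String :=
  match row.find? (fun kv => PySem.Str.lower (PySem.Str.strip kv.1) == "model") with
  | some kv => some (PySem.Str.strip kv.2)
  | none =>
    match row.find? (fun kv => PySem.Str.isIn "model" (PySem.Str.lower kv.1)) with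
    | some kv => some (PySem.Str.strip kv.2)
    | none =>
      match row with
      | [] => none
      | kv :: _ => some (PySem.Str.strip kv.2)

-- ===== PORT B =====
-- single pass carrying (substring candidate, first-value candidate)
def mnfrAltGo : List (String × String) → Option String → Option String → Option String
  | [], subCand, firstCand => match subCand with | some v => some v | none => firstCand
  | (k, v) :: rest, subCand, firstCand =>
    let vs := PySem.Str.strip v
    if PySem.Str.lower (PySem.Str.strip k) == "model" then some vs
    else
      let subCand' := if subCand.isNone && PySem.Str.isIn "model" (PySem.Str.lower k) then some vs else subCand
      let firstCand' := if firstCand.isNone then some vs else firstCand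
      mnfrAltGo rest subCand' firstCand'

def model_name_from_row_py_alt (row : List (String × String)) : Option String :=
  mnfrAltGo row none none

-- ===== PRECONDITION & SPEC =====
def Spec_model_name_from_row_py (row : List (String × String)) (out : Option String) : Prop := out = model_name_from_row_py_alt row
instance (row : List (String × String)) (out : Option String) : Decidable (Spec_model_name_from_row_py row out) := by unfold Spec_model_name_from_row_py; infer_instance

-- ===== CLAIM (what is proved, stated in full; the proofs are below) =====
def Claim_equal_model_name_from_row_py : Prop := ∀ (row : List (String × String)), Dom_model_name_from_row_py row → Spec_model_name_from_row_py row (model_name_from_row_py row)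

-- ===== LEMMAS AND PROOFS =====

-- characterisation of B's loop in terms of A's scans
theorem mnfrAltGo_eq (row : List (String × String)) (subCand firstCand : Option String) :
    mnfrAltGo row subCand firstCand =
      match row.find? (fun kv => PySem.Str.lower (PySem.Str.strip kv.1) == "model") with
      | some kv => some (PySem.Str.strip kv.2)
      | none =>
        match subCand with
        | some v => some v
        | none =>
          match row.find? (fun kv => PySem.Str.isIn "model" (PySem.Str.lower kv.1)) with
          | some kv => some (PySem.Str.strip kv.2)
          | none =>
            match firstCand with
            | some v => some v
            | none =>
              match row with
              | [] => none
              | kv :: _ => some (PySem.Str.strip kv.2) := by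
  induction row generalizing subCand firstCand with
  | nil => cases subCand <;> cases firstCand <;> simp [mnfrAltGo]
  | cons kv rest ih =>
    obtain ⟨k, v⟩ := kv
    by_cases hex : PySem.Str.lower (PySem.Str.strip k) == "model"
    · simp [mnfrAltGo, List.find?, hex]
    · simp only [mnfrAltGo, List.find?, hex, if_false, Bool.false_eq_true]
      rw [ih]
      cases subCand <;> cases firstCand <;>
        by_cases hsub : PySem.Chars.isIn ['m','o','d','e','l'] (PySem.Chars.lower k.toList) <;>
          simp [PySem.Str.isIn, hsub]

-- ===== VERDICT (by name: the statement is the Claim_ definition above) =====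
theorem model_name_from_row_py_spec : Claim_equal_model_name_from_row_py := by
  intro row _
  unfold Spec_model_name_from_row_py model_name_from_row_py model_name_from_row_py_alt
  rw [mnfrAltGo_eq]
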